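-- pv_equiv track=rewrite | github.com/cluo29/ArrangedForests | chuluodistribute.py | get_repetition_index
-- ===== SOURCE A (Python) =====
-- def get_repetition_index(distributions):
--     """
--     Count repetition index of a distribution arrangement
--
--     :param distributions: distributions already determined
--
--     :return: repetition index count
--         output example 19
--     """
--     repetition_index = 0
--
--     # check each pair without permutation
--
--     num_distri = len(distributions)
--
--     for i in range(num_distri-1):
--         for j in range(i+1, num_distri):
--             # get count between distributions[i], distributions[j]
--             list_ij = distributions[i] + distributions[j]
--             set_ij = set(list_ij)
--             repetition_ij = len(distributions[i]) + len(distributions[j]) - len(set_ij)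
--             repetition_index += repetition_ij
--
--     return repetition_index
-- ===== SOURCE B (Python) =====
-- def get_repetition_index(distributions):
--     counts = {}
--     cross = 0
--     internal = 0
--     for d in distributions:
--         dset = set(d)
--         internal += len(d) - len(dset)
--         for v in dset:
--             c = counts.get(v, 0)
--             cross += c
--             counts[v] = c + 1
--     return cross + internal * (len(distributions) - 1)
-- ===== Notes on version B (the rewrite author's own statement) =====
-- stated objective: faster
-- what changed: Replaces the quadratic all-pairs scan (building set(d_i+d_j) for every pair) by a single pass that keeps a per-value counter of how many earlier lists contain each value, accumulating cross-overlaps incrementally and weighting internal duplicates by (n-1).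
import Mathlib
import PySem

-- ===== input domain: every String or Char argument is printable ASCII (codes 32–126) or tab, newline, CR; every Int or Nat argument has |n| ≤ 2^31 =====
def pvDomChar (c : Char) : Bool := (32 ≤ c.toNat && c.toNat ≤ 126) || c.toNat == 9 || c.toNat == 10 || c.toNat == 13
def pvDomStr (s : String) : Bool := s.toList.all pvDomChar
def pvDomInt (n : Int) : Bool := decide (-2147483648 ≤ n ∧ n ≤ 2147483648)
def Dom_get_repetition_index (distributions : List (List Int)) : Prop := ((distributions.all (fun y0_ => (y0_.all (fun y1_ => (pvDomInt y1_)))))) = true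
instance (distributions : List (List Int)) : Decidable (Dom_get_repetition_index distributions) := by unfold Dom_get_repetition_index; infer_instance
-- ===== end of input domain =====

-- B replaces A's all-pairs scan (which builds set(d_i + d_j) for every pair) by a single pass
-- keeping a per-value counter of earlier occurrences (objective: faster, asymptotically).

-- ===== PORT A =====
def get_repetition_index (distributions : List (List Int)) : Int :=
  let num_distri : Int := distributions.length
  (PySem.List.pyRange 0 (num_distri - 1) 1).foldl (fun repetition_index i =>
    (PySem.List.pyRange (i + 1) num_distri 1).foldl (fun repetition_index j =>
      let di := PySem.List.pyGetD distributions i []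
      let dj := PySem.List.pyGetD distributions j []
      let list_ij := di ++ dj
      let set_ij := PySem.Set.ofList list_ij
      let repetition_ij : Int := (di.length : Int) + (dj.length : Int) - (set_ij.length : Int)
      repetition_index + repetition_ij) repetition_index) 0

-- ===== PORT B =====
def get_repetition_index_alt (distributions : List (List Int)) : Int :=
  let st := distributions.foldl (fun (st : PySem.Dict Int Int × Int × Int) d =>
    let dset := PySem.Set.ofList d
    let internal := st.2.2 + ((d.length : Int) - (dset.length : Int))
    let ct := dset.foldl (fun (p : PySem.Dict Int Int × Int) v =>
      let c := p.1.getD v 0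
      (p.1.insert v (c + 1), p.2 + c)) (st.1, st.2.1)
    (ct.1, ct.2, internal)) (PySem.Dict.empty, 0, 0)
  st.2.1 + st.2.2 * ((distributions.length : Int) - 1)

-- ===== PRECONDITION & SPEC =====
def Spec_get_repetition_index (distributions : List (List Int)) (out : Int) : Prop := out = get_repetition_index_alt distributions
instance (distributions : List (List Int)) (out : Int) : Decidable (Spec_get_repetition_index distributions out) := by unfold Spec_get_repetition_index; infer_instance

-- ===== CLAIM (what is proved, stated in full; the proofs are below) =====
def Claim_equal_get_repetition_index : Prop := ∀ (distributions : List (List Int)), Dom_get_repetition_index distributions → Spec_get_repetition_index distributions (get_repetition_index distributions)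

-- ===== LEMMAS AND PROOFS =====

-- number of duplicate occurrences inside one list
def pvDup (x : List Int) : Int := (x.length : Int) - ((PySem.Set.ofList x).length : Int)

-- overlap between the value-sets of an earlier list x and a later list y
def pvInter (x y : List Int) : Int :=
  (((PySem.Set.ofList y).filter (fun v => (PySem.Set.ofList x).contains v)).length : Int)

-- A's per-pair term, decomposed
def pvR (x y : List Int) : Int := pvDup x + pvDup y + pvInter x y

-- sum of pvR over all (earlier, later) pairs
def pvPair : List (List Int) → Int
  | [] => 0
  | x :: t => ((t.map (fun y => pvR x y)).sum) + pvPair t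

-- sum of pvInter over all (earlier, later) pairs
def pvCross : List (List Int) → Int
  | [] => 0
  | x :: t => ((t.map (fun y => pvInter x y)).sum) + pvCross t

-- the counter after processing a prefix P of lists
def pvCtr (P : List (List Int)) : PySem.Dict Int Int :=
  P.foldl (fun d x => (PySem.Set.ofList x).foldl (fun d v => d.insert v (d.getD v 0 + 1)) d)
    PySem.Dict.empty

-- B's loop body, named for the proofs (definitionally the lambda inside the port)
def pvStep (st : PySem.Dict Int Int × Int × Int) (d : List Int) :
    PySem.Dict Int Int × Int × Int :=
  let dset := PySem.Set.ofList d
  let internal := st.2.2 + ((d.length : Int) - (dset.length : Int))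
  let ct := dset.foldl (fun (p : PySem.Dict Int Int × Int) v =>
    let c := p.1.getD v 0
    (p.1.insert v (c + 1), p.2 + c)) (st.1, st.2.1)
  (ct.1, ct.2, internal)

theorem pvR_eq (x y : List Int) :
    (x.length : Int) + (y.length : Int) - ((PySem.Set.ofList (x ++ y)).length : Int) = pvR x y := by
  have h1 : PySem.Set.ofList (x ++ y)
      = PySem.Set.ofList x ++ (PySem.Set.ofList y).filter
          (fun v => !((PySem.Set.ofList x).contains v)) := by
    rw [PySem.Set.ofList_append, PySem.Set.update_eq_append_filter]
  have h2 := List.length_eq_length_filter_add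
    (fun v => (PySem.Set.ofList x).contains v) (l := PySem.Set.ofList y)
  rw [h1]
  simp only [List.length_append]
  unfold pvR pvDup pvInter
  push_cast
  omega

theorem pvSumg (ds : List (List Int)) :
    ((List.range (ds.length - 1)).map (fun k =>
      ((ds.drop (k + 1)).map (fun y => pvR (ds.getD k []) y)).sum)).sum = pvPair ds := by
  induction ds with
  | nil => simp [pvPair]
  | cons x t ih =>
    cases t with
    | nil => simp [pvPair]
    | cons y u =>
      simp only [List.length_cons, Nat.add_sub_cancel] at ih ⊢
      rw [List.range_succ_eq_map]
      simp only [List.map_cons, List.sum_cons, List.map_map, Function.comp_def,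
        List.getD_cons_succ, List.drop_succ_cons, List.getD_cons_zero] at ih ⊢
      rw [ih]
      simp [pvPair]

theorem a_eq_pair (ds : List (List Int)) : get_repetition_index ds = pvPair ds := by
  unfold get_repetition_index
  simp only []
  rw [PySem.List.foldl_congr_mem (g := fun acc i =>
    acc + ((ds.drop (i + 1).toNat).map (fun y => pvR (PySem.List.pyGetD ds i []) y)).sum)]
  · rw [PySem.List.foldl_add]
    rw [PySem.List.pyRange_one]
    simp only [List.map_map]
    have hn : ((ds.length : Int) - 1 - 0).toNat = ds.length - 1 := by omega
    rw [hn, ← pvSumg ds, zero_add]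
    congr 1
    apply List.map_congr_left
    intro k hk
    simp only [Function.comp_def, zero_add]
    have h1 : ((k : Int) + 1).toNat = k + 1 := by omega
    rw [h1, PySem.List.pyGetD_natCast]
  · intro acc i hi
    have h0 : (0:Int) ≤ i := ((PySem.List.mem_pyRange_one).1 hi).1
    refine (PySem.List.foldl_pyRange_pyGetD' ds []
      (fun acc y => acc + (((PySem.List.pyGetD ds i []).length : Int) + (y.length : Int)
        - ((PySem.Set.ofList (PySem.List.pyGetD ds i [] ++ y)).length : Int))) acc
      (a := i + 1) (by omega)).trans ?_
    rw [PySem.List.foldl_add]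
    exact congrArg (acc + ·) (congrArg List.sum (List.map_congr_left (fun y _ => pvR_eq _ y)))

-- count of v in a duplicate-free list as a 0/1 indicator
theorem pv_count_ind (l : List Int) (v : Int) (h : l.Nodup) :
    (l.count v : Int) = if l.contains v then 1 else 0 := by
  by_cases hv : v ∈ l
  · simp [List.count_eq_one_of_mem h hv, hv]
  · simp [hv, List.count_eq_zero_of_not_mem hv]

-- the inner loop over one (duplicate-free) value set = counter update + overlap sum
theorem pv_inner (l : List Int) (h : l.Nodup) :
    ∀ (c : PySem.Dict Int Int) (cr : Int),
    l.foldl (fun (p : PySem.Dict Int Int × Int) v =>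
        (p.1.insert v (p.1.getD v 0 + 1), p.2 + p.1.getD v 0)) (c, cr)
      = (l.foldl (fun d v => d.insert v (d.getD v 0 + 1)) c,
         cr + (l.map (fun v => c.getD v 0)).sum) := by
  induction l with
  | nil => intro c cr; simp
  | cons v l' ih =>
    intro c cr
    have hnd := (List.nodup_cons.1 h)
    simp only [List.foldl_cons, List.map_cons, List.sum_cons]
    rw [ih hnd.2]
    have : (l'.map (fun u => (c.insert v (c.getD v 0 + 1)).getD u 0)).sum
        = (l'.map (fun u => c.getD u 0)).sum := by
      apply congrArg List.sum
      apply List.map_congr_left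
      intro u hu
      exact PySem.Dict.getD_insert_of_ne c _ 0 (fun he => hnd.1 (he ▸ hu))
    rw [this]
    ring_nf

-- the counter over a prefix P, summed over any query list S
theorem pv_sumGetD (S : List Int) (P : List (List Int)) :
    ∀ (d0 : PySem.Dict Int Int),
    (S.map (fun v => (P.foldl (fun d x =>
        (PySem.Set.ofList x).foldl (fun d v => d.insert v (d.getD v 0 + 1)) d) d0).getD v 0)).sum
      = (S.map (fun v => d0.getD v 0)).sum
        + (P.map (fun p => (S.countP (fun v => (PySem.Set.ofList p).contains v) : Int))).sum := by
  induction P with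
  | nil => intro d0; simp
  | cons p P' ih =>
    intro d0
    simp only [List.foldl_cons, List.map_cons, List.sum_cons]
    rw [ih]
    have : (S.map (fun v => ((PySem.Set.ofList p).foldl
        (fun d v => d.insert v (d.getD v 0 + 1)) d0).getD v 0)).sum
        = (S.map (fun v => d0.getD v 0)).sum
          + (S.countP (fun v => (PySem.Set.ofList p).contains v) : Int) := by
      have h1 : ∀ v : Int, ((PySem.Set.ofList p).foldl
          (fun d v => d.insert v (d.getD v 0 + 1)) d0).getD v 0
          = d0.getD v 0 + if (PySem.Set.ofList p).contains v then 1 else 0 := by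
        intro v
        rw [PySem.Dict.getD_foldl_insert_add_one,
          pv_count_ind _ v (PySem.Set.nodup_ofList p)]
        simp [PySem.Set.contains_eq_listContains]
      rw [List.map_congr_left (fun v _ => h1 v), PySem.List.sum_map_add_int,
        PySem.List.sum_map_ite_one_zero]
    rw [this]
    ring

theorem pv_alt_eq (ds : List (List Int)) :
    get_repetition_index_alt ds =
      (ds.foldl pvStep (PySem.Dict.empty, 0, 0)).2.1
        + (ds.foldl pvStep (PySem.Dict.empty, 0, 0)).2.2 * ((ds.length : Int) - 1) := rfl

theorem pv_inter_countP (p d : List Int) :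
    pvInter p d = ((PySem.Set.ofList d).countP (fun v => (PySem.Set.ofList p).contains v) : Int) := by
  rw [pvInter, List.countP_eq_length_filter]

theorem pv_step_eq (P : List (List Int)) (cr ins : Int) (d : List Int) :
    pvStep (pvCtr P, cr, ins) d
      = (pvCtr (P ++ [d]), cr + (P.map (fun p => pvInter p d)).sum, ins + pvDup d) := by
  unfold pvStep
  simp only []
  rw [pv_inner _ (PySem.Set.nodup_ofList d) (pvCtr P) cr]
  unfold pvCtr
  rw [pv_sumGetD]
  simp only [PySem.Dict.getD_empty, PySem.List.sum_map_const_int, mul_zero]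
  rw [List.map_congr_left (fun p _ => (pv_inter_countP p d).symm)]
  simp only [List.foldl_append, List.foldl_cons, List.foldl_nil, pvDup]
  ring_nf

theorem pv_outer (ds : List (List Int)) :
    ∀ (P : List (List Int)) (cr ins : Int),
    ds.foldl pvStep (pvCtr P, cr, ins)
      = (pvCtr (P ++ ds),
         cr + (ds.map (fun d => (P.map (fun p => pvInter p d)).sum)).sum + pvCross ds,
         ins + (ds.map pvDup).sum) := by
  induction ds with
  | nil => intro P cr ins; simp [pvCross]
  | cons d t ih =>
    intro P cr ins
    simp only [List.foldl_cons]
    rw [pv_step_eq, ih (P ++ [d])]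
    simp only [Prod.mk.injEq]
    refine ⟨by rw [List.append_assoc]; rfl, ?_, ?_⟩
    · simp only [List.map_append, List.sum_append, List.map_cons, List.sum_cons,
        List.map_nil, List.sum_nil, add_zero, pvCross]
      rw [PySem.List.sum_map_add_int t
        (fun e => (P.map (fun p => pvInter p e)).sum)
        (fun e => pvInter d e)]
      ring
    · simp only [List.map_cons, List.sum_cons]; ring

theorem b_eq (ds : List (List Int)) :
    get_repetition_index_alt ds = pvCross ds + ((ds.map pvDup).sum) * ((ds.length : Int) - 1) := by
  rw [pv_alt_eq]
  have h0 : (PySem.Dict.empty, (0:Int), (0:Int)) = (pvCtr [], (0:Int), (0:Int)) := rfl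
  rw [h0, pv_outer ds [] 0 0]
  simp

theorem pair_eq_cross (ds : List (List Int)) :
    pvPair ds = pvCross ds + ((ds.map pvDup).sum) * ((ds.length : Int) - 1) := by
  induction ds with
  | nil => simp [pvPair, pvCross]
  | cons x t ih =>
    simp only [pvPair, pvCross, List.map_cons, List.sum_cons, List.length_cons]
    have h1 : (t.map (fun y => pvR x y)).sum
        = (t.length : Int) * pvDup x + (t.map pvDup).sum + (t.map (fun y => pvInter x y)).sum := by
      simp only [pvR]
      rw [PySem.List.sum_map_add_int t (fun y => pvDup x + pvDup y) (fun y => pvInter x y),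
        PySem.List.sum_map_add_int t (fun _ => pvDup x) pvDup,
        PySem.List.sum_map_const_int]
    rw [h1, ih]
    push_cast
    ring

-- ===== VERDICT (by name: the statement is the Claim_ definition above) =====
theorem get_repetition_index_spec : Claim_equal_get_repetition_index := by
  intro ds _
  show get_repetition_index ds = get_repetition_index_alt ds
  rw [a_eq_pair, b_eq, pair_eq_cross]
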